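-- pv_equiv track=rewrite | github.com/ydb-platform/ydb | contrib/python/agno/agno/knowledge/reader/pdf_reader.py | _identify_best_page_sequence
-- ===== SOURCE A (Python) =====
-- from typing import IO, Any, List, Optional, Tuple, Union
--
-- def _identify_best_page_sequence(page_numbers, range_shifts):
--     best_match = None
--     best_shift: Optional[int] = None
--     best_correct_count = 0
--
--     for shift in range_shifts:
--         expected_numbers = [i + shift for i in range(len(page_numbers))]
--         # Check if expected number occurs (or that the expected "2" occurs in an incorrectly merged number like 25,
--         # where 2 is the page number and 5 is part of the PDF content).
--         correct_count = sum(
--             1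
--             for actual, expected in zip(page_numbers, expected_numbers)
--             if actual == expected or str(actual).startswith(str(expected)) or str(actual).endswith(str(expected))
--         )
--
--         if correct_count > best_correct_count:
--             best_correct_count = correct_count
--             best_match = expected_numbers
--             best_shift = shift
--
--     return best_match, best_correct_count, best_shift
-- ===== SOURCE B (Python) =====
-- def _parse_canonical(p):
--     # value v with str(v) == p, else None
--     if p.startswith('-'):
--         neg, ds = True, p[1:]
--     else:
--         neg, ds = False, p
--     if not ds:
--         return None
--     for c in ds:
--         if c < '0' or c > '9':
--             return None
--     if len(ds) > 1 and ds[0] == '0':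
--         return None
--     if neg and ds == '0':
--         return None
--     v = 0
--     for c in ds:
--         v = v * 10 + (ord(c) - 48)
--     return -v if neg else v
--
--
-- def _identify_best_page_sequence(page_numbers, range_shifts):
--     # One pass over the pages: every page number votes for the shifts whose
--     # expected number is a canonical prefix/suffix of it; then pick the best
--     # shift among range_shifts.
--     counts = {}
--     for i, actual in enumerate(page_numbers):
--         s = str(actual)
--         vals = set()
--         for k in range(len(s)):
--             v = _parse_canonical(s[: k + 1])
--             if v is not None:
--                 vals.add(v)
--             v = _parse_canonical(s[len(s) - (k + 1):])
--             if v is not None: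
--                 vals.add(v)
--         for v in vals:
--             shift = v - i
--             counts[shift] = counts.get(shift, 0) + 1
--     best_count = 0
--     best_shift = None
--     for shift in range_shifts:
--         c = counts.get(shift, 0)
--         if c > best_count:
--             best_count = c
--             best_shift = shift
--     if best_shift is None:
--         return None, 0, None
--     return [i + best_shift for i in range(len(page_numbers))], best_count, best_shift
-- ===== Notes on version B (the rewrite author's own statement) =====
-- stated objective: faster
-- what changed: Instead of re-scanning all pages for every shift, B makes one pass over the pages, letting each page number vote (via a count dict) for every shift whose expected value is a canonical decimal prefix/suffix of it, then selects the best shift by a single scan over range_shifts.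
import Mathlib
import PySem

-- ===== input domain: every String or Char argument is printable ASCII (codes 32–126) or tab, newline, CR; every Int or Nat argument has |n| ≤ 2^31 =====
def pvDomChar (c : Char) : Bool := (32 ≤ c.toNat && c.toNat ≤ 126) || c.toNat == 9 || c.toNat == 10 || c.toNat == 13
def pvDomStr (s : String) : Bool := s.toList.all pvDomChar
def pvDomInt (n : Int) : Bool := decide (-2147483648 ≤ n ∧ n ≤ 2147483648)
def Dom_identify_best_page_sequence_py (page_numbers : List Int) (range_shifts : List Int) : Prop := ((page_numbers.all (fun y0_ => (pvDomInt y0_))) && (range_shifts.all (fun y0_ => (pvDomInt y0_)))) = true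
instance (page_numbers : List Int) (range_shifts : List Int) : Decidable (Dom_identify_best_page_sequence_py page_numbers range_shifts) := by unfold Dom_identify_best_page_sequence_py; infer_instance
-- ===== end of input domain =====

-- B replaces A's scan of all pages per shift by one pass over the pages that counts, in a
-- dict, the shifts voted for by each page's canonical decimal prefixes/suffixes (faster when
-- there are many candidate shifts).


-- ===== PORT A =====
-- actual == expected or str(actual).startswith(str(expected)) or str(actual).endswith(str(expected))
def pyMatchA (actual expected : Int) : Bool :=
  actual == expected
    || PySem.Str.startswith (PySem.Int.toStr actual) (PySem.Int.toStr expected)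
    || PySem.Str.endswith (PySem.Int.toStr actual) (PySem.Int.toStr expected)

def identify_best_page_sequence_py (page_numbers : List Int) (range_shifts : List Int) : Option (List Int) × Int × Option Int :=
  range_shifts.foldl
    (fun st shift =>
      let expected_numbers : List Int := (List.range page_numbers.length).map (fun i => (Int.ofNat i) + shift)
      let correct_count : Int :=
        ((page_numbers.zip expected_numbers).map (fun p => if pyMatchA p.1 p.2 then (1 : Int) else 0)).sum
      if correct_count > st.2.1 then (some expected_numbers, correct_count, some shift) else st)
    (none, 0, none)

-- ===== PORT B =====
-- _parse_canonical(p): the int v with str(v) == p, else None (manual parse, mirrors Source B)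
def parseCanonical (p : List Char) : Option Int :=
  let neg := PySem.Chars.startswith p ['-']
  let ds := if neg then p.tail else p  -- p[1:] on a list that starts with '-'
  if ds = [] then none
  else if ¬ (ds.all fun c => '0' ≤ c && c ≤ '9') then none
  else if ds.length > 1 ∧ ds.head? = some '0' then none
  else if neg ∧ ds = ['0'] then none
  else
    let v : Int := ds.foldl (fun v c => v * 10 + ((c.toNat : Int) - 48)) 0
    some (if neg then -v else v)

-- the set of canonical values read off s's prefixes s[:k+1] and suffixes s[len-(k+1):]
def candVals (s : List Char) : PySem.Set Int :=
  (List.range s.length).foldl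
    (fun vals k =>
      let vals := match parseCanonical (s.take (k + 1)) with
        | some v => PySem.Set.add vals v
        | none => vals
      match parseCanonical (s.drop (s.length - (k + 1))) with
        | some v => PySem.Set.add vals v
        | none => vals)
    PySem.Set.empty

def identify_best_page_sequence_py_alt (page_numbers : List Int) (range_shifts : List Int) : Option (List Int) × Int × Option Int :=
  let counts : PySem.Dict Int Int :=
    (PySem.List.enumerate page_numbers).foldl
      (fun counts p =>
        (candVals (PySem.Int.toChars p.2)).foldl
          (fun d v => d.insert (v - p.1) (d.getD (v - p.1) 0 + 1)) counts)
      PySem.Dict.empty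
  let sel : Int × Option Int :=
    range_shifts.foldl
      (fun st shift =>
        let c := counts.getD shift 0
        if c > st.1 then (c, some shift) else st)
      (0, none)
  match sel.2 with
  | none => (none, 0, none)
  | some bs => (some ((List.range page_numbers.length).map (fun i => (Int.ofNat i) + bs)), sel.1, some bs)

-- ===== PRECONDITION & SPEC =====
def Spec_identify_best_page_sequence_py (page_numbers : List Int) (range_shifts : List Int) (out : Option (List Int) × Int × Option Int) : Prop := out = identify_best_page_sequence_py_alt page_numbers range_shifts
instance (page_numbers : List Int) (range_shifts : List Int) (out : Option (List Int) × Int × Option Int) : Decidable (Spec_identify_best_page_sequence_py page_numbers range_shifts out) := by unfold Spec_identify_best_page_sequence_py; infer_instance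

-- ===== CLAIM (what is proved, stated in full; the proofs are below) =====
def Claim_equal_identify_best_page_sequence_py : Prop := ∀ (page_numbers : List Int) (range_shifts : List Int), Dom_identify_best_page_sequence_py page_numbers range_shifts → Spec_identify_best_page_sequence_py page_numbers range_shifts (identify_best_page_sequence_py page_numbers range_shifts)

-- ===== LEMMAS AND PROOFS =====

-- digit characters
def isDig (c : Char) : Bool := '0' ≤ c && c ≤ '9'

lemma char_eq_of_toNat_eq {c d : Char} (h : c.toNat = d.toNat) : c = d := by
  apply Char.ext; apply UInt32.toNat_inj.mp; exact h

lemma isDig_iff {c : Char} : isDig c = true ↔ 48 ≤ c.toNat ∧ c.toNat ≤ 57 := by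
  simp only [isDig, Bool.and_eq_true, decide_eq_true_eq, Char.le_def]
  constructor
  · rintro ⟨h1, h2⟩
    exact ⟨UInt32.le_iff_toNat_le.mp h1, UInt32.le_iff_toNat_le.mp h2⟩
  · rintro ⟨h1, h2⟩
    exact ⟨UInt32.le_iff_toNat_le.mpr h1, UInt32.le_iff_toNat_le.mpr h2⟩

lemma digitChar_toNat {d : Nat} (h : d < 10) : (Nat.digitChar d).toNat = 48 + d := by
  interval_cases d <;> decide

lemma isDig_digitChar {d : Nat} (h : d < 10) : isDig (Nat.digitChar d) = true := by
  interval_cases d <;> decide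

lemma digitChar_val {d : Nat} (h : d < 10) : (Nat.digitChar d).toNat - 48 = d := by
  rw [digitChar_toNat h]; omega

lemma digitChar_of_isDig {c : Char} (h : isDig c = true) : Nat.digitChar (c.toNat - 48) = c := by
  obtain ⟨h1, h2⟩ := isDig_iff.mp h
  apply char_eq_of_toNat_eq
  rw [digitChar_toNat (by omega)]
  omega

lemma digitChar_eq_zero_iff {d : Nat} (h : d < 10) : Nat.digitChar d = '0' ↔ d = 0 := by
  constructor
  · intro hd
    have := congrArg Char.toNat hd
    rw [digitChar_toNat h] at this
    simpa using this
  · rintro rfl; rfl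

-- Nat.toDigits via Nat.digits
lemma toDigitsCore_eq (fuel : Nat) : ∀ (n : Nat) (ds : List Char), n < fuel →
    Nat.toDigitsCore 10 fuel n ds =
      (if n = 0 then ['0'] else ((Nat.digits 10 n).map Nat.digitChar).reverse) ++ ds := by
  induction fuel with
  | zero => intro n ds h; omega
  | succ f ih =>
    intro n ds h
    rw [Nat.toDigitsCore]
    by_cases h0 : n = 0
    · subst h0; simp; rfl
    · have h10 : Nat.digits 10 n = n % 10 :: Nat.digits 10 (n / 10) :=
        Nat.digits_def' (by norm_num) (Nat.pos_of_ne_zero h0)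
      rw [if_neg h0]
      by_cases hq : n / 10 = 0
      · rw [if_pos hq, h10, Nat.digits_eq_nil_iff_eq_zero.mpr hq]
        simp
      · have hlt : n / 10 < f := by have := Nat.div_lt_self (Nat.pos_of_ne_zero h0) (by norm_num : (1:Nat) < 10); omega
        rw [if_neg hq, ih (n / 10) _ hlt, if_neg hq, h10]
        simp
lemma toDigits10_eq (m : Nat) :
    Nat.toDigits 10 m = if m = 0 then ['0'] else ((Nat.digits 10 m).map Nat.digitChar).reverse := by
  rw [Nat.toDigits, toDigitsCore_eq (m + 1) m [] (by omega)]
  simp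

-- Horner over digit chars = ofDigits of the reversed digit values
lemma horner_eq (ds : List Char) : ∀ (a : Int), ds.all isDig = true →
    ds.foldl (fun v c => v * 10 + ((c.toNat : Int) - 48)) a
      = a * (10 : Int) ^ ds.length + ((Nat.ofDigits 10 ((ds.map (fun c => c.toNat - 48)).reverse) : Nat) : Int) := by
  induction ds with
  | nil => intro a _; simp
  | cons c tl ih =>
    intro a hall
    simp only [List.all_cons, Bool.and_eq_true] at hall
    obtain ⟨hc, htl⟩ := hall
    have h48 := (isDig_iff.mp hc).1
    simp only [List.foldl_cons, List.map_cons, List.reverse_cons, List.length_cons]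
    rw [ih _ htl]
    rw [show Nat.ofDigits 10 ((tl.map (fun c => c.toNat - 48)).reverse ++ [c.toNat - 48])
          = Nat.ofDigits 10 ((tl.map (fun c => c.toNat - 48)).reverse)
            + 10 ^ tl.length * Nat.ofDigits 10 [c.toNat - 48] by
        rw [Nat.ofDigits_append]; simp]
    rw [Nat.ofDigits_singleton]
    push_cast [Nat.cast_sub h48]
    ring


lemma isDig_toNat_ne {c : Char} (h : isDig c = true) (h0 : c ≠ '0') : c.toNat ≠ 48 := by
  intro hc; exact h0 (char_eq_of_toNat_eq hc)

lemma startswith_dash_iff {p : List Char} :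
    PySem.Chars.startswith p ['-'] = true ↔ ∃ r, p = '-' :: r := by
  rw [PySem.Chars.startswith_iff]
  constructor
  · rintro ⟨t, ht⟩; exact ⟨t, ht.symm⟩
  · rintro ⟨r, rfl⟩; exact ⟨r, rfl⟩

-- facts about the digit block of str(m), m ≠ 0
lemma digitsChars_all (m : Nat) :
    (((Nat.digits 10 m).map Nat.digitChar).reverse).all isDig = true := by
  simp only [List.all_reverse, List.all_map, List.all_eq_true, Function.comp_apply]
  intro d hd
  exact isDig_digitChar (Nat.digits_lt_base (by norm_num) hd)

lemma all_dig_unfold {ds : List Char} (h : ds.all isDig = true) : ∀ x ∈ ds, '0' ≤ x ∧ x ≤ '9' := by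
  rw [List.all_eq_true] at h
  intro x hx
  simpa [isDig] using h x hx

lemma digitsChars_ne_nil (m : Nat) (hm : m ≠ 0) :
    ((Nat.digits 10 m).map Nat.digitChar).reverse ≠ [] := by
  simp [Nat.digits_ne_nil_iff_ne_zero.mpr hm]

lemma digitsChars_head? (m : Nat) (hm : m ≠ 0) {c : Char}
    (h : (((Nat.digits 10 m).map Nat.digitChar).reverse).head? = some c) : c ≠ '0' := by
  have hnn : Nat.digits 10 m ≠ [] := Nat.digits_ne_nil_iff_ne_zero.mpr hm
  rw [List.head?_reverse, List.getLast?_map] at h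
  rw [List.getLast?_eq_some_getLast hnn] at h
  simp only [Option.map_some, Option.some.injEq] at h
  subst h
  have hlt : (Nat.digits 10 m).getLast hnn < 10 :=
    Nat.digits_lt_base (by norm_num) (List.getLast_mem hnn)
  rw [Ne, digitChar_eq_zero_iff hlt]
  exact Nat.getLast_digit_ne_zero 10 hm

lemma digitsChars_horner (m : Nat) :
    (((Nat.digits 10 m).map Nat.digitChar).reverse).foldl
        (fun v c => v * 10 + ((c.toNat : Int) - 48)) 0 = (m : Int) := by
  rw [horner_eq _ 0 (digitsChars_all m)]
  have hmap : (((Nat.digits 10 m).map Nat.digitChar).reverse).map (fun c => c.toNat - 48)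
      = ((Nat.digits 10 m).map (fun d => (Nat.digitChar d).toNat - 48)).reverse := by
    simp [List.map_reverse, List.map_map, Function.comp]
  have hid : (Nat.digits 10 m).map (fun d => (Nat.digitChar d).toNat - 48) = Nat.digits 10 m := by
    conv_rhs => rw [← List.map_id (Nat.digits 10 m)]
    apply List.map_congr_left
    intro d hd
    exact digitChar_val (Nat.digits_lt_base (by norm_num) hd)
  rw [hmap, hid, List.reverse_reverse, Nat.ofDigits_digits]
  simp

lemma digitsChars_ne_zero_singleton (m : Nat) (hm : m ≠ 0) :
    ((Nat.digits 10 m).map Nat.digitChar).reverse ≠ ['0'] := by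
  intro h
  have := digitsChars_head? m hm (by rw [h]; rfl)
  exact this rfl

-- char-list form of str(e)
lemma toChars_eq (e : Int) :
    PySem.Int.toChars e = if e < 0 then '-' :: Nat.toDigits 10 e.natAbs else Nat.toDigits 10 e.toNat := rfl

-- roundtrips
lemma parseCanonical_toChars (e : Int) : parseCanonical (PySem.Int.toChars e) = some e := by
  rw [toChars_eq]
  by_cases he : e < 0
  · rw [if_pos he]
    have hm : e.natAbs ≠ 0 := by omega
    rw [toDigits10_eq, if_neg hm]
    have hneg : PySem.Chars.startswith
        ('-' :: ((Nat.digits 10 e.natAbs).map Nat.digitChar).reverse) ['-'] = true :=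
      startswith_dash_iff.mpr ⟨_, rfl⟩
    simp only [parseCanonical, hneg, if_true, List.tail_cons]
    rw [if_neg (digitsChars_ne_nil _ hm),
      if_neg (by simpa using all_dig_unfold (digitsChars_all e.natAbs)),
      if_neg (by rintro ⟨h1, h2⟩; exact digitsChars_head? _ hm h2 rfl),
      if_neg (by rintro ⟨_, h2⟩; exact digitsChars_ne_zero_singleton _ hm h2)]
    simp only [digitsChars_horner, Option.some.injEq]
    omega
  · rw [if_neg he]
    by_cases h0 : e.toNat = 0
    · have : e = 0 := by omega
      subst this
      decide
    · rw [toDigits10_eq, if_neg h0]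
      have hne := digitsChars_ne_nil _ h0
      have hnotdash : PySem.Chars.startswith
          (((Nat.digits 10 e.toNat).map Nat.digitChar).reverse) ['-'] = false := by
        rw [Bool.eq_false_iff, Ne, startswith_dash_iff]
        rintro ⟨r, hr⟩
        have hd : isDig '-' = true := by
          have h := digitsChars_all e.toNat
          rw [hr] at h
          simp only [List.all_cons, Bool.and_eq_true] at h
          exact h.1
        simp [isDig_iff] at hd
      simp only [parseCanonical, hnotdash, if_false, Bool.false_eq_true]
      rw [if_neg hne,
        if_neg (by simpa using all_dig_unfold (digitsChars_all e.toNat)),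
        if_neg (by rintro ⟨h1, h2⟩; exact digitsChars_head? _ h0 h2 rfl),
        if_neg (by rintro ⟨h1, _⟩; simp at h1)]
      simp only [digitsChars_horner, Option.some.injEq]
      omega

-- if parsing succeeds, printing gives p back
lemma digitBlock_core (ds : List Char) (hne : ds ≠ []) (hdig : ds.all isDig = true)
    (hlead : ¬(ds.length > 1 ∧ ds.head? = some '0')) (hnz : ds ≠ ['0']) :
    (Nat.ofDigits 10 ((ds.map (fun c => c.toNat - 48)).reverse) : Nat) ≠ 0 ∧
      Nat.toDigits 10 (Nat.ofDigits 10 ((ds.map (fun c => c.toNat - 48)).reverse) : Nat) = ds := by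
  obtain ⟨c, tl, rfl⟩ := List.exists_cons_of_ne_nil hne
  have hc0 : c ≠ '0' := by
    intro hcc
    subst hcc
    rcases eq_or_ne tl [] with rfl | htl
    · exact hnz rfl
    · exact hlead ⟨by have := List.length_pos_of_ne_nil htl; simp; omega, rfl⟩
  have hcdig : isDig c = true := by
    simp only [List.all_cons, Bool.and_eq_true] at hdig; exact hdig.1
  have hLform : ((c :: tl).map (fun c => c.toNat - 48)).reverse
      = (tl.map (fun c => c.toNat - 48)).reverse ++ [c.toNat - 48] := by simp
  have hlast? : (((c :: tl).map (fun c => c.toNat - 48)).reverse).getLast? = some (c.toNat - 48) := by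
    rw [hLform]; exact List.getLast?_concat
  have hcval : c.toNat - 48 ≠ 0 := by
    have := isDig_iff.mp hcdig
    have := isDig_toNat_ne hcdig hc0
    omega
  have hltb : ∀ l ∈ ((c :: tl).map (fun c => c.toNat - 48)).reverse, l < 10 := by
    intro l hl
    simp only [List.mem_reverse, List.mem_map] at hl
    obtain ⟨x, hx, rfl⟩ := hl
    have := isDig_iff.mp (by rw [List.all_eq_true] at hdig; exact hdig x hx)
    omega
  have hdg : Nat.digits 10 (Nat.ofDigits 10 ((((c :: tl)).map (fun c => c.toNat - 48)).reverse))
      = (((c :: tl)).map (fun c => c.toNat - 48)).reverse := by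
    refine Nat.digits_ofDigits 10 (by norm_num) _ hltb (fun hL => ?_)
    have h2 := List.getLast?_eq_some_getLast hL
    have h3 := hlast?.symm.trans h2
    simp only [Option.some.injEq] at h3
    rw [← h3]
    exact hcval
  have hm0 : (Nat.ofDigits 10 ((((c :: tl)).map (fun c => c.toNat - 48)).reverse) : Nat) ≠ 0 := by
    intro hm
    rw [hm] at hdg
    simp at hdg
  refine ⟨hm0, ?_⟩
  rw [toDigits10_eq, if_neg hm0, hdg]
  rw [List.map_reverse, List.reverse_reverse, List.map_map]
  conv_rhs => rw [← List.map_id (c :: tl)]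
  apply List.map_congr_left
  intro x hx
  exact digitChar_of_isDig (by rw [List.all_eq_true] at hdig; exact hdig x hx)

lemma toChars_of_parseCanonical {p : List Char} {e : Int} (h : parseCanonical p = some e) :
    PySem.Int.toChars e = p := by
  unfold parseCanonical at h
  cases hneg : PySem.Chars.startswith p ['-']
  case false =>
    rw [hneg] at h
    simp only [Bool.false_eq_true, if_false] at h
    by_cases hne : p = []
    · rw [if_pos hne] at h; exact absurd h (by simp)
    rw [if_neg hne] at h
    by_cases hdig : p.all isDig = true
    swap
    · rw [if_pos (by simpa [isDig] using hdig)] at h; exact absurd h (by simp)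
    rw [if_neg (by simpa [isDig] using hdig)] at h
    by_cases hlead : p.length > 1 ∧ p.head? = some '0'
    · rw [if_pos hlead] at h; exact absurd h (by simp)
    rw [if_neg hlead, if_neg (by simp)] at h
    simp only [Option.some.injEq] at h
    rw [horner_eq p 0 hdig] at h
    by_cases hz : p = ['0']
    · subst hz
      have : e = 0 := by simpa using h.symm
      subst this
      decide
    · obtain ⟨hm0, htd⟩ := digitBlock_core p hne hdig hlead hz
      have he : e = (Nat.ofDigits 10 ((p.map (fun c => c.toNat - 48)).reverse) : Nat) := by
        rw [← h]; simp
      rw [toChars_eq, if_neg (by omega), he]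
      simpa using htd
  case true =>
    rw [hneg] at h
    simp only [if_true] at h
    obtain ⟨ds, rfl⟩ := startswith_dash_iff.mp hneg
    simp only [List.tail_cons] at h
    by_cases hne : ds = []
    · rw [if_pos hne] at h; exact absurd h (by simp)
    rw [if_neg hne] at h
    by_cases hdig : ds.all isDig = true
    swap
    · rw [if_pos (by simpa [isDig] using hdig)] at h; exact absurd h (by simp)
    rw [if_neg (by simpa [isDig] using hdig)] at h
    by_cases hlead : ds.length > 1 ∧ ds.head? = some '0'
    · rw [if_pos hlead] at h; exact absurd h (by simp)
    rw [if_neg hlead] at h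
    by_cases hz : ds = ['0']
    · rw [if_pos ⟨trivial, hz⟩] at h; exact absurd h (by simp)
    rw [if_neg (by rintro ⟨_, hzz⟩; exact hz hzz)] at h
    simp only [Option.some.injEq] at h
    rw [horner_eq ds 0 hdig] at h
    obtain ⟨hm0, htd⟩ := digitBlock_core ds hne hdig hlead hz
    have he : e = -(Nat.ofDigits 10 ((ds.map (fun c => c.toNat - 48)).reverse) : Nat) := by
      rw [← h]; simp
    rw [toChars_eq, if_pos (by omega), he]
    simp only [List.cons.injEq, true_and]
    have habs : (-(Nat.ofDigits 10 ((ds.map (fun c => c.toNat - 48)).reverse) : Nat) : Int).natAbs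
        = (Nat.ofDigits 10 ((ds.map (fun c => c.toNat - 48)).reverse) : Nat) := by simp
    rw [habs, htd]

-- membership in candVals
def candStep (s : List Char) (vals : PySem.Set Int) (k : Nat) : PySem.Set Int :=
  let vals := match parseCanonical (s.take (k + 1)) with
    | some v => PySem.Set.add vals v
    | none => vals
  match parseCanonical (s.drop (s.length - (k + 1))) with
    | some v => PySem.Set.add vals v
    | none => vals

lemma candVals_eq (s : List Char) :
    candVals s = (List.range s.length).foldl (candStep s) PySem.Set.empty := rfl

lemma mem_candStep {s : List Char} {vals : PySem.Set Int} {k : Nat} {x : Int} :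
    x ∈ candStep s vals k ↔ x ∈ vals ∨ parseCanonical (s.take (k + 1)) = some x
      ∨ parseCanonical (s.drop (s.length - (k + 1))) = some x := by
  unfold candStep
  cases h1 : parseCanonical (s.take (k + 1)) <;>
    cases h2 : parseCanonical (s.drop (s.length - (k + 1))) <;>
      simp [h1, h2, PySem.Set.mem_add, eq_comm] <;> tauto

lemma nodup_candStep {s : List Char} {vals : PySem.Set Int} (h : vals.Nodup) (k : Nat) :
    (candStep s vals k).Nodup := by
  unfold candStep
  cases h1 : parseCanonical (s.take (k + 1)) <;>
    cases h2 : parseCanonical (s.drop (s.length - (k + 1))) <;>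
      simp [h1, h2] <;>
      first
        | exact h
        | (apply PySem.Set.nodup_add; exact h)
        | (apply PySem.Set.nodup_add; apply PySem.Set.nodup_add; exact h)

lemma mem_candFold (s : List Char) (l : List Nat) : ∀ (init : PySem.Set Int) (x : Int),
    (x ∈ l.foldl (candStep s) init
      ↔ x ∈ init ∨ ∃ k ∈ l, parseCanonical (s.take (k + 1)) = some x
          ∨ parseCanonical (s.drop (s.length - (k + 1))) = some x) := by
  induction l with
  | nil => intro init x; simp
  | cons a t ih =>
    intro init x
    rw [List.foldl_cons, ih, mem_candStep, List.exists_mem_cons_iff]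
    exact or_assoc

lemma mem_candVals {s : List Char} {x : Int} :
    x ∈ candVals s ↔ ∃ k < s.length,
      parseCanonical (s.take (k + 1)) = some x ∨ parseCanonical (s.drop (s.length - (k + 1))) = some x := by
  rw [candVals_eq, mem_candFold]
  simp [PySem.Set.empty, List.mem_range]

lemma nodup_candVals (s : List Char) : (candVals s).Nodup := by
  rw [candVals_eq]
  have : ∀ (l : List Nat) (init : PySem.Set Int), init.Nodup → (l.foldl (candStep s) init).Nodup := by
    intro l
    induction l with
    | nil => intro init h; simpa using h
    | cons a t ih => intro init h; exact ih _ (nodup_candStep h a)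
  exact this _ _ List.nodup_nil

lemma toChars_ne_nil (e : Int) : PySem.Int.toChars e ≠ [] := by
  rw [toChars_eq]
  split
  · simp
  · rw [toDigits10_eq]
    split
    · simp
    · exact digitsChars_ne_nil _ (by assumption)

-- the central per-pair equivalence
lemma match_iff_mem (a e : Int) : pyMatchA a e = true ↔ e ∈ candVals (PySem.Int.toChars a) := by
  have hps : pyMatchA a e = true ↔
      (PySem.Int.toChars e <+: PySem.Int.toChars a ∨ PySem.Int.toChars e <:+ PySem.Int.toChars a) := by
    simp only [pyMatchA, Bool.or_eq_true, beq_iff_eq, PySem.Str.startswith_eq,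
      PySem.Str.endswith_eq, PySem.Int.toList_toStr, PySem.Chars.startswith_iff,
      PySem.Chars.endswith_iff]
    constructor
    · rintro ((rfl | h) | h)
      · exact Or.inl (List.prefix_refl _)
      · exact Or.inl h
      · exact Or.inr h
    · rintro (h | h)
      · exact Or.inl (Or.inr h)
      · exact Or.inr h
  rw [hps, mem_candVals]
  have hpne := toChars_ne_nil e
  have hplen : 1 ≤ (PySem.Int.toChars e).length := List.length_pos_of_ne_nil hpne
  constructor
  · rintro (h | h)
    · have hl := h.length_le
      refine ⟨(PySem.Int.toChars e).length - 1, by omega, Or.inl ?_⟩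
      rw [show (PySem.Int.toChars e).length - 1 + 1 = (PySem.Int.toChars e).length by omega,
        ← List.prefix_iff_eq_take.mp h]
      exact parseCanonical_toChars e
    · have hl := h.length_le
      refine ⟨(PySem.Int.toChars e).length - 1, by omega, Or.inr ?_⟩
      rw [show (PySem.Int.toChars e).length - 1 + 1 = (PySem.Int.toChars e).length by omega,
        ← List.suffix_iff_eq_drop.mp h]
      exact parseCanonical_toChars e
  · rintro ⟨k, hk, h | h⟩
    · left
      rw [toChars_of_parseCanonical h]
      exact List.take_prefix _ _
    · right
      rw [toChars_of_parseCanonical h]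
      exact List.drop_suffix _ _

-- counting
lemma counts_getD (l : List (Int × Int)) : ∀ (d : PySem.Dict Int Int) (sh : Int),
    (l.foldl (fun counts p =>
        (candVals (PySem.Int.toChars p.2)).foldl
          (fun d v => d.insert (v - p.1) (d.getD (v - p.1) 0 + 1)) counts) d).getD sh 0
      = d.getD sh 0 + (l.map (fun p => if pyMatchA p.2 (p.1 + sh) then (1 : Int) else 0)).sum := by
  induction l with
  | nil => intro d sh; simp
  | cons a t ih =>
    intro d sh
    rw [List.foldl_cons, ih]
    have hinner : ((candVals (PySem.Int.toChars a.2)).foldl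
          (fun d v => d.insert (v - a.1) (d.getD (v - a.1) 0 + 1)) d).getD sh 0
        = d.getD sh 0 + (if pyMatchA a.2 (a.1 + sh) then (1 : Int) else 0) := by
      rw [show (candVals (PySem.Int.toChars a.2)).foldl
            (fun d v => d.insert (v - a.1) (d.getD (v - a.1) 0 + 1)) d
          = ((candVals (PySem.Int.toChars a.2)).map (fun v => v - a.1)).foldl
            (fun d x => d.insert x (d.getD x 0 + 1)) d by rw [List.foldl_map]]
      rw [PySem.Dict.getD_foldl_insert_add_one]
      have hinj : Function.Injective (fun v : Int => v - a.1) := fun x y hxy => by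
        simpa using hxy
      have hkey : List.count sh ((candVals (PySem.Int.toChars a.2)).map (fun v => v - a.1))
          = List.count (a.1 + sh) (candVals (PySem.Int.toChars a.2)) := by
        have hc := List.count_map_of_injective (candVals (PySem.Int.toChars a.2))
          (fun v : Int => v - a.1) hinj (a.1 + sh)
        simpa using hc
      rw [hkey]
      by_cases hmem : (a.1 + sh) ∈ candVals (PySem.Int.toChars a.2)
      · rw [List.count_eq_one_of_mem (nodup_candVals _) hmem,
          if_pos ((match_iff_mem a.2 (a.1 + sh)).mpr hmem)]
        simp
      · rw [List.count_eq_zero_of_not_mem hmem,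
          if_neg (fun hc => hmem ((match_iff_mem a.2 (a.1 + sh)).mp hc))]
        simp
    rw [hinner]
    simp only [List.map_cons, List.sum_cons]
    ring

lemma zipRange_eq (pn : List Int) (sh : Int) :
    pn.zip ((List.range pn.length).map (fun i => (Int.ofNat i) + sh))
      = (PySem.List.enumerate pn).map (fun p => (p.2, p.1 + sh)) := by
  apply List.ext_getElem
  · simp [PySem.List.length_enumerate]
  · intro j h1 h2
    have hj : j < pn.length := by simpa using h1
    rw [List.getElem_zip]
    simp [PySem.List.getElem_enumerate]

lemma countA_gen (pn : List Int) (sh : Int) :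
    ((pn.zip ((List.range pn.length).map (fun i => (Int.ofNat i) + sh))).map
        (fun p => if pyMatchA p.1 p.2 then (1 : Int) else 0)).sum
      = ((PySem.List.enumerate pn).map
          (fun p => if pyMatchA p.2 (p.1 + sh) then (1 : Int) else 0)).sum := by
  rw [zipRange_eq, List.map_map]
  rfl

-- selection: A's fold carries (best list, best count, best shift); B's only (count, shift)
lemma sel_rel (cnt : Int → Int) (mk : Int → List Int) (l : List Int) :
    ∀ (stB : Int × Option Int), (stB.2 = none → stB.1 = 0) →
      (l.foldl (fun st shift =>
          if cnt shift > st.2.1 then (some (mk shift), cnt shift, some shift) else st)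
          (stB.2.map mk, stB.1, stB.2)
        = ((l.foldl (fun st shift => if cnt shift > st.1 then (cnt shift, some shift) else st) stB).2.map mk,
            (l.foldl (fun st shift => if cnt shift > st.1 then (cnt shift, some shift) else st) stB).1,
            (l.foldl (fun st shift => if cnt shift > st.1 then (cnt shift, some shift) else st) stB).2))
      ∧ ((l.foldl (fun st shift => if cnt shift > st.1 then (cnt shift, some shift) else st) stB).2 = none
          → (l.foldl (fun st shift => if cnt shift > st.1 then (cnt shift, some shift) else st) stB).1 = 0) := by
  induction l with
  | nil => intro stB h0; exact ⟨rfl, h0⟩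
  | cons a t ih =>
    intro stB h0
    simp only [List.foldl_cons]
    by_cases hc : cnt a > stB.1
    · rw [if_pos hc, if_pos (by simpa using hc)]
      exact ih (cnt a, some a) (by simp)
    · rw [if_neg hc, if_neg (by simpa using hc)]
      exact ih stB h0

-- ===== VERDICT (by name: the statement is the Claim_ definition above) =====
theorem identify_best_page_sequence_py_spec : Claim_equal_identify_best_page_sequence_py := by
  intro page_numbers range_shifts _
  unfold Spec_identify_best_page_sequence_py identify_best_page_sequence_py identify_best_page_sequence_py_alt
  set counts : PySem.Dict Int Int :=
    (PySem.List.enumerate page_numbers).foldl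
      (fun counts p =>
        (candVals (PySem.Int.toChars p.2)).foldl
          (fun d v => d.insert (v - p.1) (d.getD (v - p.1) 0 + 1)) counts)
      PySem.Dict.empty with hcounts
  have hcnt : ∀ sh : Int,
      ((page_numbers.zip ((List.range page_numbers.length).map (fun i => (Int.ofNat i) + sh))).map
        (fun p => if pyMatchA p.1 p.2 then (1 : Int) else 0)).sum = counts.getD sh 0 := by
    intro sh
    rw [hcounts, counts_getD, countA_gen page_numbers sh]
    simp
  have hfunA : (fun (st : Option (List Int) × Int × Option Int) (shift : Int) =>
        let expected_numbers : List Int := (List.range page_numbers.length).map (fun i => (Int.ofNat i) + shift)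
        let correct_count : Int :=
          ((page_numbers.zip expected_numbers).map (fun p => if pyMatchA p.1 p.2 then (1 : Int) else 0)).sum
        if correct_count > st.2.1 then (some expected_numbers, correct_count, some shift) else st)
      = (fun st shift =>
          if counts.getD shift 0 > st.2.1
          then (some ((List.range page_numbers.length).map (fun i => (Int.ofNat i) + shift)), counts.getD shift 0, some shift)
          else st) := by
    funext st shift
    simp only [hcnt shift]
  rw [hfunA]
  obtain ⟨heq, h0⟩ := sel_rel (fun sh => counts.getD sh 0)
    (fun sh => (List.range page_numbers.length).map (fun i => (Int.ofNat i) + sh)) range_shifts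
    (0, none) (by simp)
  simp only [Option.map_none] at heq
  rw [heq]
  cases hsel : (range_shifts.foldl
      (fun st shift => if counts.getD shift 0 > st.1 then (counts.getD shift 0, some shift) else st)
      ((0 : Int), (none : Option Int))).2 with
  | none => simp [hsel, h0 hsel]
  | some bs => simp [hsel]
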